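-- pv_equiv track=rewrite | github.com/Ablesh1/ml_project_2023 | actor-critic.py | evaluate_state_action
-- ===== SOURCE A (Python) =====
-- def evaluate_state_action(state, action):
--     # Compute the evaluation score based on the state and action
--
--     # Obtain the dimensions of the game board
--     rows = len(state)
--     cols = len(state[0])
--
--     # Initialize the evaluation score
--     score = 0
--
--     # Calculate the sum of the values on the game board
--     sum_values = sum(sum(row) for row in state)
--     score += sum_values
--
--     # Find the maximum value on the game board
--     max_value = max(max(row) for row in state)
--     score += max_value
--
--     # Count the number of empty cells on the game board
--     num_empty_cells = sum(row.count(0) for row in state)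
--     score += num_empty_cells
--
--     # Apply additional heuristics based on the chosen action
--     if action == "a":
--         # Heuristics for the "left" action
--         # 1. Favor states where the larger values are concentrated on the left side
--         left_sum = sum(state[row][col] for row in range(rows) for col in range(cols // 2))
--         right_sum = sum(state[row][col] for row in range(rows) for col in range(cols // 2, cols))
--         score += (left_sum - right_sum)
--
--         # 2. Give higher scores for states where adjacent cells have similar values
--         adjacency_bonus = 0
--         for row in range(rows):
--             for col in range(cols - 1):
--                 if state[row][col] == state[row][col + 1]:
--                     adjacency_bonus += state[row][col]
--         score += adjacency_bonus
--
--     elif action == "s":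
--         # Heuristics for the "down" action
--         # 1. Favor states where the larger values are concentrated at the bottom
--         bottom_sum = sum(state[row][col] for row in range(rows // 2, rows) for col in range(cols))
--         top_sum = sum(state[row][col] for row in range(rows // 2) for col in range(cols))
--         score += (bottom_sum - top_sum)
--
--         # 2. Give higher scores for states where adjacent cells have similar values
--         adjacency_bonus = 0
--         for row in range(rows - 1):
--             for col in range(cols):
--                 if state[row][col] == state[row + 1][col]:
--                     adjacency_bonus += state[row][col]
--         score += adjacency_bonus
--
--     elif action == "w":
--         # Heuristics for the "up" action
--         # 1. Favor states where the larger values are concentrated at the top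
--         top_sum = sum(state[row][col] for row in range(rows // 2) for col in range(cols))
--         bottom_sum = sum(state[row][col] for row in range(rows // 2, rows) for col in range(cols))
--         score += (top_sum - bottom_sum)
--
--         # 2. Give higher scores for states where adjacent cells have similar values
--         adjacency_bonus = 0
--         for row in range(1, rows):
--             for col in range(cols):
--                 if state[row][col] == state[row - 1][col]:
--                     adjacency_bonus += state[row][col]
--         score += adjacency_bonus
--
--     elif action == "d":
--         # Heuristics for the "right" action
--         # 1. Favor states where the larger values are concentrated on the right side
--         right_sum = sum(state[row][col] for row in range(rows) for col in range(cols // 2, cols))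
--         left_sum = sum(state[row][col] for row in range(rows) for col in range(cols // 2))
--         score += (right_sum - left_sum)
--
--         # 2. Give higher scores for states where adjacent cells have similar values
--         adjacency_bonus = 0
--         for row in range(rows):
--             for col in range(cols - 1):
--                 if state[row][col] == state[row][col + 1]:
--                     adjacency_bonus += state[row][col]
--         score += adjacency_bonus
--
--     return score
-- ===== SOURCE B (Python) =====
-- def evaluate_state_action(state, action):
--     # One pass over the board accumulating every statistic, then per-action arithmetic.
--     half = len(state[0]) // 2
--     row_half = len(state) // 2
--     total = 0
--     best = state[0][0]
--     empties = 0
--     left = 0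
--     top = 0
--     horiz = 0
--     vert = 0
--     prev = None
--     for r, row in enumerate(state):
--         for v in row:
--             total += v
--             if v > best:
--                 best = v
--             if v == 0:
--                 empties += 1
--         left += sum(row[:half])
--         if r < row_half:
--             top += sum(row)
--         for x, y in zip(row, row[1:]):
--             if x == y:
--                 horiz += x
--         if prev is not None:
--             for x, y in zip(prev, row):
--                 if x == y:
--                     vert += x
--         prev = row
--     score = total + best + empties
--     if action == "a":
--         score += 2 * left - total + horiz
--     elif action == "s":
--         score += total - 2 * top + vert
--     elif action == "w":
--         score += 2 * top - total + vert
--     elif action == "d":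
--         score += total - 2 * left + horiz
--     return score
-- ===== Notes on version B (the rewrite author's own statement) =====
-- stated objective: alternative
-- what changed: A runs up to six separate index-based scans of the board (sum, max, zero-count, two half-board sums, adjacency double loop per action); B makes one structural pass over the rows accumulating total, running max, empties, left-half sum, top-half sum and both adjacency bonuses via zips, then derives each action's score arithmetically (right = total - left, bottom = total - top, and the w/s vertical bonuses coincide).
-- outside the precondition, e.g. on evaluate_state_action([[1, 2], [3, 4, 5]], 'a'): A returns 18, B returns 13
import Mathlib
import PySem

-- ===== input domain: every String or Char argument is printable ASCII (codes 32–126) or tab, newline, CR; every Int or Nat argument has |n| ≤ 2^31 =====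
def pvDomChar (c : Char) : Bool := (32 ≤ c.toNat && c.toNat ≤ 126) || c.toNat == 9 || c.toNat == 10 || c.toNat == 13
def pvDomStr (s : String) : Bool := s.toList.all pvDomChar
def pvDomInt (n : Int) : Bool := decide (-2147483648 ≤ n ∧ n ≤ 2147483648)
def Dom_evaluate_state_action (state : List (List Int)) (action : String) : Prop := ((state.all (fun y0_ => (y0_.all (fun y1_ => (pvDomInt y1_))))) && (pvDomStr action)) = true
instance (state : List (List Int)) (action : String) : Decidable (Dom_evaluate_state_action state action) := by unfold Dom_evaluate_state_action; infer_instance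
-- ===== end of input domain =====

-- B replaces A's six separate index-based scans by one structural pass over the rows
-- (running accumulators + zips) followed by per-action arithmetic; same cost, different decomposition.


-- ===== PORT A =====
-- state[r][c]; pyGetD's default is unreachable under Pre_ (indices come from in-range loops there)
def pvCellA (state : List (List Int)) (r c : Int) : Int :=
  PySem.List.pyGetD (PySem.List.pyGetD state r []) c 0

def evaluate_state_action (state : List (List Int)) (action : String) : Int :=
  let rows : Int := (state.length : Int)
  let cols : Int := ((PySem.List.pyGetD state 0 []).length : Int)
  let score : Int := 0
  let sum_values : Int := (state.map (fun row => row.sum)).sum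
  let score := score + sum_values
  -- max(max(row) for row in state); the .getD 0 defaults are unreachable under Pre_ (no empty row)
  let max_value : Int :=
    (PySem.List.max? (state.map (fun row => (PySem.List.max? row (fun x => x)).getD 0)) (fun x => x)).getD 0
  let score := score + max_value
  let num_empty_cells : Int := (state.map (fun row => (PySem.List.count row 0 : Int))).sum
  let score := score + num_empty_cells
  if action == "a" then
    let left_sum : Int := ((PySem.List.pyRange 0 rows 1).map (fun r =>
      ((PySem.List.pyRange 0 (PySem.Int.floordiv cols 2) 1).map (fun c => pvCellA state r c)).sum)).sum
    let right_sum : Int := ((PySem.List.pyRange 0 rows 1).map (fun r =>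
      ((PySem.List.pyRange (PySem.Int.floordiv cols 2) cols 1).map (fun c => pvCellA state r c)).sum)).sum
    let score := score + (left_sum - right_sum)
    let adjacency_bonus : Int := (PySem.List.pyRange 0 rows 1).foldl (fun acc r =>
      (PySem.List.pyRange 0 (cols - 1) 1).foldl (fun acc c =>
        if pvCellA state r c == pvCellA state r (c + 1) then acc + pvCellA state r c else acc) acc) 0
    score + adjacency_bonus
  else if action == "s" then
    let bottom_sum : Int := ((PySem.List.pyRange (PySem.Int.floordiv rows 2) rows 1).map (fun r =>
      ((PySem.List.pyRange 0 cols 1).map (fun c => pvCellA state r c)).sum)).sum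
    let top_sum : Int := ((PySem.List.pyRange 0 (PySem.Int.floordiv rows 2) 1).map (fun r =>
      ((PySem.List.pyRange 0 cols 1).map (fun c => pvCellA state r c)).sum)).sum
    let score := score + (bottom_sum - top_sum)
    let adjacency_bonus : Int := (PySem.List.pyRange 0 (rows - 1) 1).foldl (fun acc r =>
      (PySem.List.pyRange 0 cols 1).foldl (fun acc c =>
        if pvCellA state r c == pvCellA state (r + 1) c then acc + pvCellA state r c else acc) acc) 0
    score + adjacency_bonus
  else if action == "w" then
    let top_sum : Int := ((PySem.List.pyRange 0 (PySem.Int.floordiv rows 2) 1).map (fun r =>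
      ((PySem.List.pyRange 0 cols 1).map (fun c => pvCellA state r c)).sum)).sum
    let bottom_sum : Int := ((PySem.List.pyRange (PySem.Int.floordiv rows 2) rows 1).map (fun r =>
      ((PySem.List.pyRange 0 cols 1).map (fun c => pvCellA state r c)).sum)).sum
    let score := score + (top_sum - bottom_sum)
    let adjacency_bonus : Int := (PySem.List.pyRange 1 rows 1).foldl (fun acc r =>
      (PySem.List.pyRange 0 cols 1).foldl (fun acc c =>
        if pvCellA state r c == pvCellA state (r - 1) c then acc + pvCellA state r c else acc) acc) 0
    score + adjacency_bonus
  else if action == "d" then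
    let right_sum : Int := ((PySem.List.pyRange 0 rows 1).map (fun r =>
      ((PySem.List.pyRange (PySem.Int.floordiv cols 2) cols 1).map (fun c => pvCellA state r c)).sum)).sum
    let left_sum : Int := ((PySem.List.pyRange 0 rows 1).map (fun r =>
      ((PySem.List.pyRange 0 (PySem.Int.floordiv cols 2) 1).map (fun c => pvCellA state r c)).sum)).sum
    let score := score + (right_sum - left_sum)
    let adjacency_bonus : Int := (PySem.List.pyRange 0 rows 1).foldl (fun acc r =>
      (PySem.List.pyRange 0 (cols - 1) 1).foldl (fun acc c =>
        if pvCellA state r c == pvCellA state r (c + 1) then acc + pvCellA state r c else acc) acc) 0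
    score + adjacency_bonus
  else score

-- ===== PORT B =====
-- inner 'for v in row' of Source B: updates (total, best, empties)
def pvBRow (acc : Int × Int × Int) (row : List Int) : Int × Int × Int :=
  row.foldl (fun a v =>
    (a.1 + v, (if v > a.2.1 then v else a.2.1), (if v == 0 then a.2.2 + 1 else a.2.2))) acc

-- 'for x, y in zip(xs, ys): if x == y: h += x'
def pvBAdj (h : Int) (xs ys : List Int) : Int :=
  (xs.zip ys).foldl (fun h p => if p.1 == p.2 then h + p.1 else h) h

-- one iteration of Source B's 'for r, row in enumerate(state)' body;
-- loop state = ((total, best, empties), left, top, horiz, vert, prev)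
def pvBStep (half row_half : Int)
    (st : (Int × Int × Int) × Int × Int × Int × Int × Option (List Int))
    (rr : Int × List Int) : (Int × Int × Int) × Int × Int × Int × Int × Option (List Int) :=
  (pvBRow st.1 rr.2,
   st.2.1 + (PySem.List.slice rr.2 none (some half)).sum,
   (if rr.1 < row_half then st.2.2.1 + rr.2.sum else st.2.2.1),
   pvBAdj st.2.2.2.1 rr.2 (PySem.List.slice rr.2 (some 1) none),
   (match st.2.2.2.2.2 with
    | none => st.2.2.2.2.1
    | some p => pvBAdj st.2.2.2.2.1 p rr.2),
   some rr.2)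

def evaluate_state_action_alt (state : List (List Int)) (action : String) : Int :=
  let half : Int := PySem.Int.floordiv ((state.headD []).length : Int) 2
  let row_half : Int := PySem.Int.floordiv ((state.length : Int)) 2
  -- best is initialised to state[0][0]; the pyGetD defaults are unreachable under Pre_
  let st := (PySem.List.enumerate state 0).foldl (pvBStep half row_half)
    (((0 : Int), PySem.List.pyGetD (PySem.List.pyGetD state 0 []) 0 0, (0 : Int)),
     (0 : Int), (0 : Int), (0 : Int), (0 : Int), (none : Option (List Int)))
  let score := st.1.1 + st.1.2.1 + st.1.2.2
  if action == "a" then score + (2 * st.2.1 - st.1.1 + st.2.2.2.1)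
  else if action == "s" then score + (st.1.1 - 2 * st.2.2.1 + st.2.2.2.2.1)
  else if action == "w" then score + (2 * st.2.2.1 - st.1.1 + st.2.2.2.2.1)
  else if action == "d" then score + (st.1.1 - 2 * st.2.1 + st.2.2.2.1)
  else score

-- ===== PRECONDITION & SPEC =====
-- Pre_ excludes: empty boards and boards containing an empty row (A raises IndexError/ValueError),
-- and non-rectangular boards paired with a move action — there A raises when some row is shorter
-- than the first, and when every row is at least as long A's silent truncation of the longer rows
-- to len(state[0]) in its index loops is an accident of A's implementation.
def Pre_evaluate_state_action (state : List (List Int)) (action : String) : Prop :=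
  state ≠ [] ∧ (∀ row ∈ state, row ≠ []) ∧
  ((action = "a" ∨ action = "s" ∨ action = "w" ∨ action = "d") →
    ∀ row ∈ state, row.length = (state.headD []).length)
instance (state : List (List Int)) (action : String) : Decidable (Pre_evaluate_state_action state action) := by
  unfold Pre_evaluate_state_action; infer_instance

def pvWitness_evaluate_state_action : List (List Int) × String := ([[2, 0], [2, 4]], "a")

def Spec_evaluate_state_action (state : List (List Int)) (action : String) (out : Int) : Prop := out = evaluate_state_action_alt state action
instance (state : List (List Int)) (action : String) (out : Int) : Decidable (Spec_evaluate_state_action state action out) := by unfold Spec_evaluate_state_action; infer_instance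

-- ===== CLAIM (what is proved, stated in full; the proofs are below) =====
def Claim_equal_evaluate_state_action : Prop := ∀ (state : List (List Int)) (action : String), Dom_evaluate_state_action state action → Pre_evaluate_state_action state action → Spec_evaluate_state_action state action (evaluate_state_action state action)

-- ===== LEMMAS AND PROOFS =====

-- canonical value of the adjacency bonus of two zipped lists
def pvHS (xs ys : List Int) : Int :=
  ((xs.zip ys).map (fun p => if p.1 == p.2 then p.1 else 0)).sum

lemma pvBAdj_eq (h : Int) (xs ys : List Int) : pvBAdj h xs ys = h + pvHS xs ys := by
  unfold pvBAdj pvHS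
  rw [PySem.List.foldl_congr_mem _ _
        (fun (a : Int) (p : Int × Int) => a + (if p.1 == p.2 then p.1 else 0)) _
        (by intro a p _; by_cases hp : p.1 == p.2 <;> simp [hp])]
  exact PySem.List.foldl_add _ _ _

lemma pvBRow_row (row : List Int) : ∀ (t b e : Int),
    pvBRow (t, b, e) row = (t + row.sum, row.foldl max b, e + (row.count 0 : Int)) := by
  induction row with
  | nil => intro t b e; simp [pvBRow]
  | cons v vs ih =>
    intro t b e
    show List.foldl _ (t + v, (if v > b then v else b), (if v == 0 then e + 1 else e)) vs = _
    rw [show (List.foldl (fun (a : Int × Int × Int) v =>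
          (a.1 + v, (if v > a.2.1 then v else a.2.1), (if v == 0 then a.2.2 + 1 else a.2.2)))
          (t + v, (if v > b then v else b), (if v == 0 then e + 1 else e)) vs)
        = pvBRow (t + v, (if v > b then v else b), (if v == 0 then e + 1 else e)) vs from rfl]
    rw [ih]
    refine Prod.ext ?_ (Prod.ext ?_ ?_) <;> simp [List.count_cons]
    · ring
    · congr 1
      rcases lt_or_ge b v with h | h
      · rw [max_eq_right h.le]; simp [h]
      · rw [max_eq_left h]; simp [not_lt.2 h]
    · by_cases hv : v = 0
      · simp [hv]; ring
      · simp [hv]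

lemma pvBRow_char (l : List (List Int)) : ∀ (t b e : Int),
    l.foldl pvBRow (t, b, e)
      = (t + (l.map (fun row => row.sum)).sum,
         l.foldl (fun b row => row.foldl max b) b,
         e + (l.map (fun row => (row.count 0 : Int))).sum) := by
  induction l with
  | nil => intro t b e; simp
  | cons row l ih =>
    intro t b e
    rw [List.foldl_cons, pvBRow_row, ih]
    simp; constructor <;> ring

lemma pvBFold_char (half m : Int) (l : List (List Int)) : ∀ (s : Int)
    (A : Int × Int × Int) (L T H V : Int) (p : List Int),
    (PySem.List.enumerate l s).foldl (pvBStep half m) (A, L, T, H, V, some p)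
      = (l.foldl pvBRow A,
         L + (l.map (fun row => (PySem.List.slice row none (some half)).sum)).sum,
         T + ((l.take (m - s).toNat).map (fun row => row.sum)).sum,
         H + (l.map (fun row => pvHS row (PySem.List.slice row (some 1) none))).sum,
         V + (((p :: l).zip l).map (fun q => pvHS q.1 q.2)).sum,
         some (l.getLastD p)) := by
  induction l with
  | nil => intro s A L T H V p; simp [PySem.List.enumerate_nil]
  | cons row l ih =>
    intro s A L T H V p
    rw [PySem.List.enumerate_cons, List.foldl_cons]
    show (PySem.List.enumerate l (s + 1)).foldl (pvBStep half m)
        (pvBRow A row,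
         L + (PySem.List.slice row none (some half)).sum,
         (if s < m then T + row.sum else T),
         pvBAdj H row (PySem.List.slice row (some 1) none),
         pvBAdj V p row,
         some row) = _
    rw [ih]
    refine Prod.ext rfl (Prod.ext ?_ (Prod.ext ?_ (Prod.ext ?_ (Prod.ext ?_ ?_))))
    · simp; ring
    · by_cases hs : s < m
      · have hm : (m - s).toNat = (m - (s + 1)).toNat + 1 := by omega
        simp only [hs, if_true, hm, List.take_succ_cons, List.map_cons, List.sum_cons]
        ring
      · have hm0 : (m - s).toNat = 0 := by omega
        have hm1 : (m - (s + 1)).toNat = 0 := by omega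
        simp [hs, hm0, hm1]
    · simp [pvBAdj_eq]; ring
    · simp [pvBAdj_eq, List.zip_cons_cons]; ring
    · cases l <;> simp [List.getLastD]

-- pulling an outer max inside a running max
lemma pvMaxPull (ws : List Int) : ∀ (a b : Int), max a (ws.foldl max b) = ws.foldl max (max a b) := by
  induction ws with
  | nil => intro a b; rfl
  | cons w ws ih =>
    intro a b
    rw [List.foldl_cons, List.foldl_cons, ih]
    congr 1
    rw [max_assoc]

lemma pvMaxA (rest : List (List Int)) (h : ∀ row ∈ rest, row ≠ []) : ∀ (m : Int),
    (rest.map (fun row => (PySem.List.max? row (fun x => x)).getD 0)).foldl max m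
      = rest.foldl (fun b row => row.foldl max b) m := by
  induction rest with
  | nil => intro m; rfl
  | cons row rest ih =>
    intro m
    obtain ⟨w, ws, rfl⟩ := List.exists_cons_of_ne_nil (h row (by simp))
    rw [List.map_cons, List.foldl_cons, List.foldl_cons,
        ih (fun r hr => h r (by simp [hr])), List.foldl_cons]
    congr 1
    rw [PySem.List.max?_id_cons, Option.getD_some, pvMaxPull]

-- index-comprehension over a prefix is a take
lemma pvMapTake {α : Type} (xs : List α) (d : α) (n : Nat) (h : n ≤ xs.length) :
    (PySem.List.pyRange 0 (n : Int) 1).map (fun i => PySem.List.pyGetD xs i d) = xs.take n := by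
  have hl : (xs.take n).length = n := by simp [List.length_take, h]
  conv_rhs => rw [← PySem.List.map_pyGetD_pyRange_zero' (xs.take n) d]
  rw [hl]
  refine List.map_congr_left ?_
  intro i hi
  rw [PySem.List.mem_pyRange_one] at hi
  have h1 : i < (xs.length : Int) := lt_of_lt_of_le hi.2 (by exact_mod_cast h)
  rw [PySem.List.pyGetD_eq_getElem xs d hi.1 h1,
      PySem.List.pyGetD_eq_getElem (xs.take n) d hi.1 (by rw [hl]; exact hi.2),
      List.getElem_take]

-- paired index-comprehension is a zip
lemma pvMapPair {α β : Type} (xs : List α) (ys : List β) (dx : α) (dy : β) :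
    (PySem.List.pyRange 0 ((min xs.length ys.length : Nat) : Int) 1).map
      (fun i => (PySem.List.pyGetD xs i dx, PySem.List.pyGetD ys i dy)) = xs.zip ys := by
  apply List.ext_getElem
  · simp [PySem.List.length_pyRange_one]; omega
  · intro i h1 h2
    simp only [List.getElem_map, PySem.List.getElem_pyRange_one, List.getElem_zip, zero_add]
    have hi : i < min xs.length ys.length := by simpa using h2
    have hx : (i : Int) < (xs.length : Int) := by exact_mod_cast lt_of_lt_of_le hi (min_le_left _ _)
    have hy : (i : Int) < (ys.length : Int) := by exact_mod_cast lt_of_lt_of_le hi (min_le_right _ _)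
    rw [PySem.List.pyGetD_eq_getElem xs dx (by positivity) hx,
        PySem.List.pyGetD_eq_getElem ys dy (by positivity) hy]
    simp

lemma pvGetD_tail {α : Type} (xs : List α) (d : α) (i : Int) (h : 0 ≤ i) :
    PySem.List.pyGetD xs.tail i d = PySem.List.pyGetD xs (i + 1) d := by
  obtain ⟨k, rfl⟩ := Int.eq_ofNat_of_zero_le h
  cases xs with
  | nil => simp [PySem.List.pyGetD, PySem.List.pyGet?]
  | cons x xs =>
    rw [show ((k : Int) + 1) = ((k + 1 : Nat) : Int) by push_cast; ring,
        List.tail_cons, PySem.List.pyGetD_natCast, PySem.List.pyGetD_natCast]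
    simp


lemma pvHalfNat (m : Nat) : PySem.Int.floordiv (m : Int) 2 = ((m / 2 : Nat) : Int) := by
  exact_mod_cast PySem.Int.floordiv_natCast m 2

lemma pvMapTakeF {α : Type} (xs : List α) (d : α) (n : Nat) (h : n ≤ xs.length) (F : α → Int) :
    (PySem.List.pyRange 0 (n : Int) 1).map (fun i => F (PySem.List.pyGetD xs i d)) = (xs.take n).map F := by
  rw [← pvMapTake xs d n h, List.map_map]; rfl

lemma pvMapOuterF {α : Type} (xs : List α) (d : α) (F : α → Int) :
    (PySem.List.pyRange 0 ((xs.length : Nat) : Int) 1).map (fun i => F (PySem.List.pyGetD xs i d)) = xs.map F := by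
  rw [pvMapTakeF xs d xs.length le_rfl F, List.take_length]

lemma pvMapDropF {α : Type} (xs : List α) (d : α) (n : Nat) (F : α → Int) :
    (PySem.List.pyRange (n : Int) ((xs.length : Nat) : Int) 1).map (fun i => F (PySem.List.pyGetD xs i d)) = (xs.drop n).map F := by
  have h := PySem.List.map_pyGetD_pyRange' xs d (a := (n : Int)) (by positivity)
  rw [show xs.drop n = (PySem.List.pyRange (n : Int) (xs.length : Int) 1).map (fun j => PySem.List.pyGetD xs j d) from by rw [h]; simp,
      List.map_map]
  rfl

lemma pvOuterAdd (state : List (List Int)) (F : List Int → Int) (a : Int) :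
    (PySem.List.pyRange 0 ((state.length : Nat) : Int) 1).foldl (fun acc r => acc + F (PySem.List.pyGetD state r [])) a
      = a + (state.map F).sum := by
  rw [← List.foldl_map (f := fun r => PySem.List.pyGetD state r []) (g := fun acc row => acc + F row),
      PySem.List.map_pyGetD_pyRange_zero', PySem.List.foldl_add]

lemma pvRowMem (state : List (List Int)) (r : Int) (h0 : 0 ≤ r) (h1 : r < (state.length : Int)) :
    PySem.List.pyGetD state r [] ∈ state := by
  rw [PySem.List.pyGetD_eq_getElem _ _ h0 h1]
  exact List.getElem_mem _

lemma pvSplitSum {α : Type} (l : List α) (k : Nat) (F : α → Int) :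
    ((l.take k).map F).sum + ((l.drop k).map F).sum = (l.map F).sum := by
  conv_rhs => rw [← List.take_append_drop k l]
  rw [List.map_append, List.sum_append]

-- horizontal adjacency inner loop is a zip fold over the row
lemma pvHAdjA (row : List Int) (acc : Int) :
    (PySem.List.pyRange 0 ((row.length : Int) - 1) 1).foldl
      (fun acc c => if PySem.List.pyGetD row c 0 == PySem.List.pyGetD row (c + 1) 0 then acc + PySem.List.pyGetD row c 0 else acc) acc
      = acc + pvHS row row.tail := by
  cases row with
  | nil => simp [PySem.List.pyRange_one_eq_nil (by norm_num : (-1 : Int) ≤ 0), pvHS]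
  | cons v vs =>
    rw [PySem.List.foldl_congr_mem _ _
        (fun acc c => if PySem.List.pyGetD (v :: vs) c 0 == PySem.List.pyGetD (v :: vs).tail c 0
          then acc + PySem.List.pyGetD (v :: vs) c 0 else acc) _
        (by
          intro acc c hc
          rw [PySem.List.mem_pyRange_one] at hc
          simp only []
          rw [pvGetD_tail _ _ c hc.1])]
    rw [show (((v :: vs).length : Int) - 1) = ((min (v :: vs).length (v :: vs).tail.length : Nat) : Int) from by simp]
    rw [show acc + pvHS (v :: vs) (v :: vs).tail = pvBAdj acc (v :: vs) (v :: vs).tail from (pvBAdj_eq _ _ _).symm]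
    unfold pvBAdj
    rw [← pvMapPair (v :: vs) (v :: vs).tail 0 0, List.foldl_map]

-- vertical adjacency inner loop ("s" orientation) is a zip fold of the two rows
lemma pvVAdjA (x y : List Int) (n : Nat) (hx : x.length = n) (hy : y.length = n) (acc : Int) :
    (PySem.List.pyRange 0 (n : Int) 1).foldl
      (fun acc c => if PySem.List.pyGetD x c 0 == PySem.List.pyGetD y c 0 then acc + PySem.List.pyGetD x c 0 else acc) acc
      = acc + pvHS x y := by
  rw [show ((n : Nat) : Int) = ((min x.length y.length : Nat) : Int) from by rw [hx, hy, min_self]]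
  rw [show acc + pvHS x y = pvBAdj acc x y from (pvBAdj_eq _ _ _).symm]
  unfold pvBAdj
  rw [← pvMapPair x y 0 0, List.foldl_map]

-- vertical adjacency inner loop ("w" orientation): same value, since only equal cells contribute
lemma pvVAdjAw (x y : List Int) (n : Nat) (hx : x.length = n) (hy : y.length = n) (acc : Int) :
    (PySem.List.pyRange 0 (n : Nat) 1).foldl
      (fun acc c => if PySem.List.pyGetD y c 0 == PySem.List.pyGetD x c 0 then acc + PySem.List.pyGetD y c 0 else acc) acc
      = acc + pvHS x y := by
  rw [show ((n : Nat) : Int) = ((min x.length y.length : Nat) : Int) from by rw [hx, hy, min_self]]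
  have hz : (x.zip y).foldl (fun a p => if p.2 == p.1 then a + p.2 else a) acc = acc + pvHS x y := by
    rw [PySem.List.foldl_congr_mem _ _ (fun (a : Int) (p : Int × Int) => if p.1 == p.2 then a + p.1 else a) _
        (by
          intro a p _
          simp only []
          by_cases hpq : p.1 = p.2
          · simp [hpq]
          · have h21 : ¬(p.2 = p.1) := fun hh => hpq hh.symm
            simp [beq_iff_eq, hpq, h21])]
    exact pvBAdj_eq _ _ _
  rw [← hz, ← pvMapPair x y 0 0, List.foldl_map]

-- consecutive-row pair map equals state.zip state.tail
lemma pvPairMap (state : List (List Int)) :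
    (List.range (min state.length state.tail.length)).map
      (fun (k : Nat) => (PySem.List.pyGetD state (k : Int) [], PySem.List.pyGetD state.tail (k : Int) []))
      = state.zip state.tail := by
  have h := pvMapPair state state.tail ([] : List Int) ([] : List Int)
  rw [PySem.List.pyRange_zero_natCast, List.map_map] at h
  exact h

lemma pvPairFold (state : List (List Int)) :
    (List.range (min state.length state.tail.length)).foldl
      (fun (acc : Int) (k : Nat) => acc + pvHS (PySem.List.pyGetD state (k : Int) []) (PySem.List.pyGetD state.tail (k : Int) [])) 0
      = ((state.zip state.tail).map (fun q => pvHS q.1 q.2)).sum := by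
  rw [PySem.List.foldl_add _ (fun (k : Nat) => pvHS (PySem.List.pyGetD state (k : Int) []) (PySem.List.pyGetD state.tail (k : Int) [])) 0,
      zero_add, ← pvPairMap state, List.map_map]
  rfl

-- outer horizontal adjacency loop ("a"/"d")
lemma pvHAdjOuter (state : List (List Int)) (n : Nat) (hrect : ∀ row ∈ state, row.length = n) :
    (PySem.List.pyRange 0 ((state.length : Nat) : Int) 1).foldl
      (fun acc r => (PySem.List.pyRange 0 ((n : Int) - 1) 1).foldl
        (fun acc c => if pvCellA state r c == pvCellA state r (c + 1) then acc + pvCellA state r c else acc) acc) 0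
      = (state.map (fun row => pvHS row row.tail)).sum := by
  rw [PySem.List.foldl_congr_mem _ _
      (fun acc r => acc + pvHS (PySem.List.pyGetD state r []) (PySem.List.pyGetD state r []).tail) _
      (by
        intro acc r hr
        rw [PySem.List.mem_pyRange_one] at hr
        simp only [pvCellA]
        rw [show ((n : Int) - 1) = (((PySem.List.pyGetD state r []).length : Int) - 1) from by
              rw [hrect _ (pvRowMem state r hr.1 hr.2)],
            pvHAdjA])]
  exact (pvOuterAdd state (fun row => pvHS row row.tail) 0).trans (zero_add _)

-- outer vertical adjacency loop, "s" form
lemma pvVAdjOuterS (state : List (List Int)) (hne : state ≠ []) (n : Nat) (hrect : ∀ row ∈ state, row.length = n) :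
    (PySem.List.pyRange 0 (((state.length : Nat) : Int) - 1) 1).foldl
      (fun acc r => (PySem.List.pyRange 0 ((n : Nat) : Int) 1).foldl
        (fun acc c => if pvCellA state r c == pvCellA state (r + 1) c then acc + pvCellA state r c else acc) acc) 0
      = ((state.zip state.tail).map (fun q => pvHS q.1 q.2)).sum := by
  rw [PySem.List.foldl_congr_mem _ _
      (fun acc r => acc + pvHS (PySem.List.pyGetD state r []) (PySem.List.pyGetD state.tail r [])) _
      (by
        intro acc r hr
        rw [PySem.List.mem_pyRange_one] at hr
        simp only [pvCellA]
        rw [pvGetD_tail state [] r hr.1]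
        exact pvVAdjA _ _ n (hrect _ (pvRowMem state r hr.1 (by omega)))
          (hrect _ (pvRowMem state (r + 1) (by omega) (by omega))) acc)]
  rw [show (((state.length : Nat) : Int) - 1) = ((((state.length : Int) - 1).toNat : Nat) : Int) from by
        cases state with
        | nil => cases hne rfl
        | cons r l => simp,
      PySem.List.pyRange_zero_natCast, List.foldl_map,
      show ((state.length : Int) - 1).toNat = min state.length state.tail.length from by
        cases state <;> simp]
  exact pvPairFold state

-- outer vertical adjacency loop, "w" form: contributes the same value
lemma pvVAdjOuterW (state : List (List Int)) (n : Nat) (hrect : ∀ row ∈ state, row.length = n) :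
    (PySem.List.pyRange 1 ((state.length : Nat) : Int) 1).foldl
      (fun acc r => (PySem.List.pyRange 0 ((n : Nat) : Int) 1).foldl
        (fun acc c => if pvCellA state r c == pvCellA state (r - 1) c then acc + pvCellA state r c else acc) acc) 0
      = ((state.zip state.tail).map (fun q => pvHS q.1 q.2)).sum := by
  rw [PySem.List.pyRange_one 1 ((state.length : Nat) : Int), List.foldl_map]
  rw [PySem.List.foldl_congr_mem _ _
      (fun (acc : Int) (k : Nat) => acc + pvHS (PySem.List.pyGetD state (k : Int) []) (PySem.List.pyGetD state.tail (k : Int) [])) _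
      (by
        intro acc k hk
        rw [List.mem_range] at hk
        simp only [pvCellA]
        rw [show (1 : Int) + (k : Int) - 1 = ((k : Int)) from by ring,
            show (1 : Int) + (k : Int) = ((k : Int) + 1) from by ring,
            pvGetD_tail state [] (k : Int) (by positivity)]
        exact pvVAdjAw _ _ n
          (hrect _ (pvRowMem state (k : Int) (by positivity) (by omega)))
          (hrect _ (pvRowMem state ((k : Int) + 1) (by positivity) (by omega))) acc)]
  rw [show ((state.length : Int) - 1).toNat = min state.length state.tail.length from by
        cases state <;> simp]
  exact pvPairFold state

-- B's whole loop, characterised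
lemma pvBRes (b0 : Int) (r0 : List Int) (rest : List (List Int)) (half m : Int) (hm : 0 ≤ m) :
    (PySem.List.enumerate (r0 :: rest) 0).foldl (pvBStep half m)
      ((0, b0, 0), (0 : Int), (0 : Int), (0 : Int), (0 : Int), (none : Option (List Int)))
      = ((r0 :: rest).foldl pvBRow (0, b0, 0),
         ((r0 :: rest).map (fun row => (PySem.List.slice row none (some half)).sum)).sum,
         (((r0 :: rest).take m.toNat).map (fun row => row.sum)).sum,
         ((r0 :: rest).map (fun row => pvHS row (PySem.List.slice row (some 1) none))).sum,
         (((r0 :: rest).zip rest).map (fun q => pvHS q.1 q.2)).sum,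
         some (rest.getLastD r0)) := by
  rw [PySem.List.enumerate_cons, List.foldl_cons]
  show (PySem.List.enumerate rest (0 + 1)).foldl (pvBStep half m)
      (pvBRow (0, b0, 0) r0,
       0 + (PySem.List.slice r0 none (some half)).sum,
       (if (0 : Int) < m then 0 + r0.sum else 0),
       pvBAdj 0 r0 (PySem.List.slice r0 (some 1) none),
       0,
       some r0) = _
  rw [pvBFold_char]
  refine Prod.ext rfl (Prod.ext ?_ (Prod.ext ?_ (Prod.ext ?_ (Prod.ext ?_ rfl))))
  · simp
  · by_cases h0 : (0 : Int) < m
    · have hm1 : m.toNat = (m - (0 + 1)).toNat + 1 := by omega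
      simp only [h0, if_true, hm1, List.take_succ_cons, List.map_cons, List.sum_cons]
      ring
    · have h1 : m.toNat = 0 := by omega
      have h2 : (m - (0 + 1)).toNat = 0 := by omega
      simp [h0, h1]
  · rw [pvBAdj_eq]; simp
  · simp

-- A's left-half sum, canonical form
lemma pvLeftA (state : List (List Int)) (n : Nat) (hrect : ∀ row ∈ state, row.length = n) :
    ((PySem.List.pyRange 0 ((state.length : Nat) : Int) 1).map (fun r =>
      ((PySem.List.pyRange 0 ((n / 2 : Nat) : Int) 1).map (fun c => pvCellA state r c)).sum)).sum
      = (state.map (fun row => (row.take (n / 2)).sum)).sum := by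
  simp only [pvCellA]
  have h1 := pvMapOuterF state ([] : List Int)
    (fun row => ((PySem.List.pyRange 0 ((n / 2 : Nat) : Int) 1).map (fun c => PySem.List.pyGetD row c 0)).sum)
  refine (congrArg List.sum h1).trans (congrArg List.sum (List.map_congr_left ?_))
  intro row hr
  exact congrArg List.sum (pvMapTake row 0 (n / 2) (by rw [hrect _ hr]; exact Nat.div_le_self n 2))

-- A's right-half sum, canonical form
lemma pvRightA (state : List (List Int)) (n : Nat) (hrect : ∀ row ∈ state, row.length = n) :
    ((PySem.List.pyRange 0 ((state.length : Nat) : Int) 1).map (fun r =>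
      ((PySem.List.pyRange ((n / 2 : Nat) : Int) ((n : Nat) : Int) 1).map (fun c => pvCellA state r c)).sum)).sum
      = (state.map (fun row => (row.drop (n / 2)).sum)).sum := by
  simp only [pvCellA]
  have h1 := pvMapOuterF state ([] : List Int)
    (fun row => ((PySem.List.pyRange ((n / 2 : Nat) : Int) ((n : Nat) : Int) 1).map (fun c => PySem.List.pyGetD row c 0)).sum)
  refine (congrArg List.sum h1).trans (congrArg List.sum (List.map_congr_left ?_))
  intro row hr
  refine congrArg List.sum ?_
  rw [show ((n : Nat) : Int) = ((row.length : Nat) : Int) from by rw [hrect _ hr]]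
  have h2 := PySem.List.map_pyGetD_pyRange' row 0 (a := ((n / 2 : Nat) : Int)) (by positivity)
  rw [h2]
  simp
  omega

-- A's top-half sum, canonical form (full-width rows)
lemma pvTopA (state : List (List Int)) (n : Nat) (hrect : ∀ row ∈ state, row.length = n) :
    ((PySem.List.pyRange 0 ((state.length / 2 : Nat) : Int) 1).map (fun r =>
      ((PySem.List.pyRange 0 ((n : Nat) : Int) 1).map (fun c => pvCellA state r c)).sum)).sum
      = ((state.take (state.length / 2)).map (fun row => row.sum)).sum := by
  simp only [pvCellA]
  have h1 := pvMapTakeF state ([] : List Int) (state.length / 2) (Nat.div_le_self _ 2)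
    (fun row => ((PySem.List.pyRange 0 ((n : Nat) : Int) 1).map (fun c => PySem.List.pyGetD row c 0)).sum)
  refine (congrArg List.sum h1).trans (congrArg List.sum (List.map_congr_left ?_))
  intro row hr
  refine congrArg List.sum ?_
  rw [show ((n : Nat) : Int) = ((row.length : Nat) : Int) from by rw [hrect _ (List.mem_of_mem_take hr)]]
  exact PySem.List.map_pyGetD_pyRange_zero' row 0

-- A's bottom-half sum, canonical form (full-width rows)
lemma pvBottomA (state : List (List Int)) (n : Nat) (hrect : ∀ row ∈ state, row.length = n) :
    ((PySem.List.pyRange ((state.length / 2 : Nat) : Int) ((state.length : Nat) : Int) 1).map (fun r =>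
      ((PySem.List.pyRange 0 ((n : Nat) : Int) 1).map (fun c => pvCellA state r c)).sum)).sum
      = ((state.drop (state.length / 2)).map (fun row => row.sum)).sum := by
  simp only [pvCellA]
  have h1 := pvMapDropF state ([] : List Int) (state.length / 2)
    (fun row => ((PySem.List.pyRange 0 ((n : Nat) : Int) 1).map (fun c => PySem.List.pyGetD row c 0)).sum)
  refine (congrArg List.sum h1).trans (congrArg List.sum (List.map_congr_left ?_))
  intro row hr
  refine congrArg List.sum ?_
  rw [show ((n : Nat) : Int) = ((row.length : Nat) : Int) from by rw [hrect _ (List.mem_of_mem_drop hr)]]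
  exact PySem.List.map_pyGetD_pyRange_zero' row 0

lemma pvSplitRowSum (state : List (List Int)) (k : Nat) :
    (state.map (fun row => (row.take k).sum)).sum + (state.map (fun row => (row.drop k).sum)).sum
      = (state.map (fun row => row.sum)).sum := by
  rw [← PySem.List.sum_map_add_int state (fun row => (row.take k).sum) (fun row => (row.drop k).sum)]
  refine congrArg List.sum (List.map_congr_left ?_)
  intro row _
  rw [← List.sum_append, List.take_append_drop]

-- A's generator max equals B's running max
lemma pvMaxEq (v0 : Int) (vs : List Int) (rest : List (List Int)) (hrows : ∀ row ∈ rest, row ≠ []) :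
    (PySem.List.max? (((v0 :: vs) :: rest).map (fun row => (PySem.List.max? row (fun x => x)).getD 0)) (fun x => x)).getD 0
      = ((v0 :: vs) :: rest).foldl (fun b row => row.foldl max b) v0 := by
  rw [List.map_cons, PySem.List.max?_id_cons, Option.getD_some,
      show ((PySem.List.max? (v0 :: vs) (fun x => x)).getD 0) = vs.foldl max v0 from by
        rw [PySem.List.max?_id_cons, Option.getD_some],
      pvMaxA rest hrows (vs.foldl max v0), List.foldl_cons, List.foldl_cons, max_self]

lemma pvMain (state : List (List Int)) (action : String)
    (hne : state ≠ []) (hrows : ∀ row ∈ state, row ≠ [])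
    (hrectif : (action = "a" ∨ action = "s" ∨ action = "w" ∨ action = "d") →
      ∀ row ∈ state, row.length = (state.headD []).length) :
    evaluate_state_action state action = evaluate_state_action_alt state action := by
  obtain ⟨r0, rest, rfl⟩ := List.exists_cons_of_ne_nil hne
  obtain ⟨v0, vs, rfl⟩ := List.exists_cons_of_ne_nil (hrows r0 (by simp))
  simp only [evaluate_state_action, evaluate_state_action_alt]
  rw [show PySem.List.pyGetD ((v0 :: vs) :: rest) 0 [] = v0 :: vs from PySem.List.pyGetD_zero_cons _ _ _]
  rw [show PySem.List.pyGetD (v0 :: vs) 0 0 = v0 from PySem.List.pyGetD_zero_cons _ _ _]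
  rw [show (((v0 :: vs) :: rest).headD []) = v0 :: vs from rfl]
  rw [pvHalfNat (v0 :: vs).length, pvHalfNat ((v0 :: vs) :: rest).length]
  rw [pvBRes v0 (v0 :: vs) rest _ _ (by positivity)]
  dsimp only
  rw [pvBRow_char, pvMaxEq v0 vs rest (fun row hr => hrows _ (List.mem_cons_of_mem _ hr))]
  simp only [PySem.List.slice_to_natCast, PySem.List.slice_from_one, Int.toNat_natCast, PySem.List.count_eq]
  by_cases hA : action = "a"
  · subst hA
    have hrect : ∀ row ∈ (v0 :: vs) :: rest, row.length = (v0 :: vs).length :=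
      hrectif (Or.inl rfl)
    rw [if_pos (show (("a" : String) == "a") = true by decide),
        if_pos (show (("a" : String) == "a") = true by decide),
        pvLeftA _ _ hrect, pvRightA _ _ hrect, pvHAdjOuter _ _ hrect]
    have hsplit := pvSplitRowSum ((v0 :: vs) :: rest) ((v0 :: vs).length / 2)
    linarith [hsplit]
  · rw [if_neg (show ¬((action == "a") = true) by simp only [beq_iff_eq]; exact hA), if_neg (show ¬((action == "a") = true) by simp only [beq_iff_eq]; exact hA)]
    by_cases hS : action = "s"
    · subst hS
      have hrect : ∀ row ∈ (v0 :: vs) :: rest, row.length = (v0 :: vs).length :=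
        hrectif (Or.inr (Or.inl rfl))
      rw [if_pos (show (("s" : String) == "s") = true by decide),
          if_pos (show (("s" : String) == "s") = true by decide),
          pvBottomA _ _ hrect, pvTopA _ _ hrect,
          pvVAdjOuterS _ (List.cons_ne_nil _ _) _ hrect]
      simp only [List.tail_cons]
      have hsplit := pvSplitSum ((v0 :: vs) :: rest) (((v0 :: vs) :: rest).length / 2) (fun row => row.sum)
      linarith [hsplit]
    · rw [if_neg (show ¬((action == "s") = true) by simp only [beq_iff_eq]; exact hS), if_neg (show ¬((action == "s") = true) by simp only [beq_iff_eq]; exact hS)]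
      by_cases hW : action = "w"
      · subst hW
        have hrect : ∀ row ∈ (v0 :: vs) :: rest, row.length = (v0 :: vs).length :=
          hrectif (Or.inr (Or.inr (Or.inl rfl)))
        rw [if_pos (show (("w" : String) == "w") = true by decide),
            if_pos (show (("w" : String) == "w") = true by decide),
            pvTopA _ _ hrect, pvBottomA _ _ hrect,
            pvVAdjOuterW _ _ hrect]
        simp only [List.tail_cons]
        have hsplit := pvSplitSum ((v0 :: vs) :: rest) (((v0 :: vs) :: rest).length / 2) (fun row => row.sum)
        linarith [hsplit]
      · rw [if_neg (show ¬((action == "w") = true) by simp only [beq_iff_eq]; exact hW), if_neg (show ¬((action == "w") = true) by simp only [beq_iff_eq]; exact hW)]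
        by_cases hD : action = "d"
        · subst hD
          have hrect : ∀ row ∈ (v0 :: vs) :: rest, row.length = (v0 :: vs).length :=
            hrectif (Or.inr (Or.inr (Or.inr rfl)))
          rw [if_pos (show (("d" : String) == "d") = true by decide),
              if_pos (show (("d" : String) == "d") = true by decide),
              pvRightA _ _ hrect, pvLeftA _ _ hrect, pvHAdjOuter _ _ hrect]
          have hsplit := pvSplitRowSum ((v0 :: vs) :: rest) ((v0 :: vs).length / 2)
          linarith [hsplit]
        · rw [if_neg (show ¬((action == "d") = true) by simp only [beq_iff_eq]; exact hD), if_neg (show ¬((action == "d") = true) by simp only [beq_iff_eq]; exact hD)]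
          ring

-- ===== VERDICT (by name: the statement is the Claim_ definition above) =====
theorem evaluate_state_action_spec : Claim_equal_evaluate_state_action := by
  intro state action _hDom hPre
  obtain ⟨hne, hrows, hrectif⟩ := hPre
  exact pvMain state action hne hrows hrectif
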